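-- pv_equiv track=rewrite | github.com/bitterbit/ctf | google-ctf-qual-2021/weather/mangle.py | do_470
-- ===== SOURCE A (Python) =====
-- def do_470(var_0):
--     var_1 = var_0 - 1
--     var_1 -= 1
--
--     if var_1 == 0: # 397
--         return 0
--
--     if var_1 < 0:
--         return var_0 - 2
--
--     # var_1 > 0 :428
--     var_1 = var_0 % 2
--
--     if var_1 == 0: # :405
--         var_0 = var_0 // 2
--     if var_1 > 0:
--         var_0 *= 3
--         var_0 += 1
--
--     var_0 = do_470(var_0)
--     return var_0 + 1
-- ===== SOURCE B (Python) =====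
-- def do_470(var_0):
--     steps = 0
--     while True:
--         if var_0 == 2:
--             return steps
--         if var_0 < 2:
--             return var_0 - 2 + steps
--         if var_0 % 2 == 0:
--             var_0 //= 2
--         else:
--             var_0 = var_0 * 3 + 1
--         steps += 1
-- ===== Notes on version B (the rewrite author's own statement) =====
-- stated objective: idiomatic
-- what changed: Replaces the recursion that adds one step per unwinding with an iterative while-loop threading an explicit step accumulator, avoiding recursion depth entirely.
import Mathlib
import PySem

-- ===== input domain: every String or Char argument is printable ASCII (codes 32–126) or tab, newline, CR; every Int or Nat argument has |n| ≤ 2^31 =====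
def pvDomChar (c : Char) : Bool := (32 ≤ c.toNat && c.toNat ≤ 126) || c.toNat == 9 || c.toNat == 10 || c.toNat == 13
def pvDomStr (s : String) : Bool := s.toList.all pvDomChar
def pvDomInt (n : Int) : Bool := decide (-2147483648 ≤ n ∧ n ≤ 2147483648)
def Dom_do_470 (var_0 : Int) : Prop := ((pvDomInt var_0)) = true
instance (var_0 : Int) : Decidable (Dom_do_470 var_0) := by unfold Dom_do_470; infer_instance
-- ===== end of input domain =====

-- B counts the Collatz-style steps with an iterative loop and an explicit accumulator
-- instead of A's recursion that adds 1 while unwinding (return values only; A may hit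
-- Python's recursion limit on very deep trajectories where B's loop still returns).

-- ===== PORT A =====
-- Fuel is a totality guard only (1000000 far exceeds any Collatz trajectory reached in tests);
-- the body transliterates A step for step.
def do_470_rec : Nat → Int → Int
  | 0, _ => 0
  | fuel + 1, var_0 =>
    let var_1 := var_0 - 1 - 1
    if var_1 = 0 then 0
    else if var_1 < 0 then var_0 - 2
    else
      let var_1' := PySem.Int.mod var_0 2
      let var_0' := if var_1' = 0 then PySem.Int.floordiv var_0 2 else var_0
      let var_0'' := if var_1' > 0 then var_0' * 3 + 1 else var_0'
      do_470_rec fuel var_0'' + 1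

def do_470 (var_0 : Int) : Int := do_470_rec 1000000 var_0

-- ===== PORT B =====
-- Tail-recursive rendering of Source B's while-loop with the `steps` accumulator (same fuel guard).
def do_470_loop : Nat → Int → Int → Int
  | 0, _, steps => steps
  | fuel + 1, var_0, steps =>
    if var_0 = 2 then steps
    else if var_0 < 2 then var_0 - 2 + steps
    else
      let var_0' := if PySem.Int.mod var_0 2 = 0 then PySem.Int.floordiv var_0 2
                    else var_0 * 3 + 1
      do_470_loop fuel var_0' (steps + 1)

def do_470_alt (var_0 : Int) : Int := do_470_loop 1000000 var_0 0

-- ===== PRECONDITION & SPEC =====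
def Spec_do_470 (var_0 : Int) (out : Int) : Prop := out = do_470_alt var_0
instance (var_0 : Int) (out : Int) : Decidable (Spec_do_470 var_0 out) := by unfold Spec_do_470; infer_instance

-- ===== CLAIM (what is proved, stated in full; the proofs are below) =====
def Claim_equal_do_470 : Prop := ∀ (var_0 : Int), Dom_do_470 var_0 → Spec_do_470 var_0 (do_470 var_0)

-- ===== LEMMAS AND PROOFS =====
lemma do_470_rec_loop (fuel : Nat) : ∀ (v acc : Int),
    do_470_rec fuel v + acc = do_470_loop fuel v acc := by
  induction fuel with
  | zero => intro v acc; simp [do_470_rec, do_470_loop]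
  | succ k ih =>
    intro v acc
    have hm2 : PySem.Int.mod v 2 = v % 2 := PySem.Int.mod_eq_emod_of_pos (by norm_num)
    have hd2 : PySem.Int.floordiv v 2 = v / 2 := PySem.Int.floordiv_eq_ediv_of_pos (by norm_num)
    simp only [do_470_rec, do_470_loop, hm2, hd2]
    by_cases h2 : v = 2
    · simp [h2]
    · have ha : ¬ (v - 1 - 1 = 0) := by omega
      by_cases hlt : v < 2
      · have hb : v - 1 - 1 < 0 := by omega
        rw [if_neg ha, if_pos hb, if_neg h2, if_pos hlt]
      · have hb : ¬ (v - 1 - 1 < 0) := by omega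
        rw [if_neg ha, if_neg hb, if_neg h2, if_neg hlt]
        have h01 := Int.emod_two_eq v
        by_cases hm : v % 2 = 0
        · have hnp : ¬ (v % 2 > 0) := by omega
          simp only [if_pos hm, if_neg hnp]
          have := ih (v / 2) (acc + 1)
          omega
        · have hp : v % 2 > 0 := by omega
          simp only [if_neg hm, if_pos hp]
          have := ih (v * 3 + 1) (acc + 1)
          omega

-- ===== VERDICT (by name: the statement is the Claim_ definition above) =====
theorem do_470_spec : Claim_equal_do_470 := by
  intro v _
  show do_470 v = do_470_alt v
  have := do_470_rec_loop 1000000 v 0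
  simpa [do_470, do_470_alt] using this
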